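-- pv_equiv track=rewrite | github.com/proman3419/AGH-WIET-INF-ASD-2021 | 11/genes.py | check_genes
-- ===== SOURCE A (Python) =====
-- class BSTNode:
--   def __init__(self):
--     self.A = None
--     self.C = None
--     self.G = None
--     self.T = None
--     self.end = False
--
-- def add(tree, seq):
--   curr = tree
--   for ch in seq:
--     if ch == 'A':
--       if curr.A is None: curr.A = BSTNode()
--       curr = curr.A
--     elif ch == 'C':
--       if curr.C is None: curr.C = BSTNode()
--       curr = curr.C
--     elif ch == 'G':
--       if curr.G is None: curr.G = BSTNode()
--       curr = curr.G
--     elif ch == 'T':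
--       if curr.T is None: curr.T = BSTNode()
--       curr = curr.T
--
--   if curr.end:
--     return None
--
--   curr.end = True
--
--   return tree
--
-- def check_genes(A):
--   if len(A) == 0:
--     return None
--
--   tree = BSTNode()
--
--   for seq in A:
--     tree = add(tree, seq)
--
--     if tree is None:
--       return False
--
--   return True
-- ===== SOURCE B (Python) =====
-- def check_genes(A):
--     if len(A) == 0:
--         return None
--     seen = set()
--     for seq in A:
--         key = ''.join(c for c in seq if c in 'ACGT')
--         if key in seen:
--             return False
--         seen.add(key)
--     return True
-- ===== Notes on version B (the rewrite author's own statement) =====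
-- stated objective: simpler
-- what changed: Replaces the hand-built 4-way trie (BSTNode with per-character pointer walking and an end flag) by a single pass with a set of already-seen keys, where each sequence's key is its subsequence of A/C/G/T characters (the trie silently skips every other character).
import Mathlib
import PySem

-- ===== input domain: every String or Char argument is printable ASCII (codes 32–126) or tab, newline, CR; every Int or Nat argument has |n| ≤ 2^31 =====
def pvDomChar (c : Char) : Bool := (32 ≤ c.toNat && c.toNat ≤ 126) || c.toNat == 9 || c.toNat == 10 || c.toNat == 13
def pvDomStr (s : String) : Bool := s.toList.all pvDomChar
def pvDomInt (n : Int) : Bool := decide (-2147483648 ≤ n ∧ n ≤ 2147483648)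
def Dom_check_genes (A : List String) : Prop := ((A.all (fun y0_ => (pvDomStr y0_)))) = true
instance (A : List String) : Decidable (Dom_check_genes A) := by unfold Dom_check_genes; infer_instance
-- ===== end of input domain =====

-- B replaces A's hand-built 4-way trie by a single pass with a set of already-seen
-- ACGT-filtered keys (the trie skips every non-ACGT character); objective: simpler.


-- ===== PORT A =====
-- BSTNode: `nil` represents Python's None child, `node` a BSTNode with its
-- end flag and A/C/G/T children (avoids a nested `Option` inductive).
inductive Trie
  | nil
  | node (e : Bool) (a c g t : Trie)
deriving DecidableEq, Repr

-- BSTNode() : fresh node, end = False, all children None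
def Trie.fresh : Trie := .node false .nil .nil .nil .nil

-- `if curr.X is None: curr.X = BSTNode()` step
def orNew : Trie → Trie
  | .nil => Trie.fresh
  | t => t

-- `add(tree, seq)` : walk/extend the path of seq's ACGT characters, then
-- return None (duplicate) if the final node's end flag is set, else the tree
-- with the flag set.  (The in-place mutation is ported as rebuilding the path.)
def addSeq : Trie → List Char → Option Trie
  | .nil, _ => none          -- unreachable: add is only ever called on a node
  | .node e a c g t, [] => if e then none else some (.node true a c g t)
  | .node e a c g t, ch :: rest =>
    if ch = 'A' then (addSeq (orNew a) rest).map (fun a' => .node e a' c g t)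
    else if ch = 'C' then (addSeq (orNew c) rest).map (fun c' => .node e a c' g t)
    else if ch = 'G' then (addSeq (orNew g) rest).map (fun g' => .node e a c g' t)
    else if ch = 'T' then (addSeq (orNew t) rest).map (fun t' => .node e a c g t')
    else addSeq (.node e a c g t) rest
  termination_by t s => s.length

-- the `for seq in A` loop of check_genes
def check_genes_loop : Trie → List String → Option Bool
  | _, [] => some true
  | tr, s :: rest =>
    match addSeq tr s.toList with
    | none => some false
    | some tr' => check_genes_loop tr' rest

def check_genes (A : List String) : Option Bool :=
  if A.length = 0 then none else check_genes_loop Trie.fresh A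

-- ===== PORT B =====
def isACGT (ch : Char) : Bool := ch = 'A' || ch = 'C' || ch = 'G' || ch = 'T'

-- ''.join(c for c in seq if c in 'ACGT')
def geneKey (s : String) : String := String.ofList (s.toList.filter isACGT)

def check_genes_alt_loop : PySem.Set String → List String → Option Bool
  | _, [] => some true
  | seen, s :: rest =>
    let k := geneKey s
    if seen.contains k then some false
    else check_genes_alt_loop (seen.add k) rest

def check_genes_alt (A : List String) : Option Bool :=
  if A = [] then none else check_genes_alt_loop (PySem.Set.ofList []) A

-- ===== PRECONDITION & SPEC =====
def Spec_check_genes (A : List String) (out : Option Bool) : Prop := out = check_genes_alt A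
instance (A : List String) (out : Option Bool) : Decidable (Spec_check_genes A out) := by unfold Spec_check_genes; infer_instance

-- ===== CLAIM (what is proved, stated in full; the proofs are below) =====
def Claim_equal_check_genes : Prop := ∀ (A : List String), Dom_check_genes A → Spec_check_genes A (check_genes A)

-- ===== LEMMAS AND PROOFS =====

-- a Trie that is not the None representative
def isNode : Trie → Prop
  | .nil => False
  | .node _ _ _ _ _ => True

theorem isNode_orNew (t : Trie) : isNode (orNew t) := by
  cases t <;> simp [orNew, Trie.fresh, isNode]

-- membership of a key in the trie: follow its ACGT characters, skip others
def memT : Trie → List Char → Bool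
  | .nil, _ => false
  | .node e _ _ _ _, [] => e
  | .node e a c g t, ch :: rest =>
    if ch = 'A' then memT a rest
    else if ch = 'C' then memT c rest
    else if ch = 'G' then memT g rest
    else if ch = 'T' then memT t rest
    else memT (.node e a c g t) rest
  termination_by t s => s.length

theorem memT_nil (k : List Char) : memT .nil k = false := by
  cases k <;> simp [memT]

theorem memT_fresh (k : List Char) : memT Trie.fresh k = false := by
  induction k with
  | nil => simp [memT, Trie.fresh]
  | cons ch rest ih =>
    simp only [Trie.fresh, memT] at *
    split_ifs <;> simp [memT_nil, ih]

theorem memT_orNew (t : Trie) (k : List Char) : memT (orNew t) k = memT t k := by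
  cases t with
  | nil => simp [orNew, memT_fresh, memT_nil]
  | node e a c g t => rfl

-- the filtered key A's trie effectively stores
def filt (s : List Char) : List Char := s.filter isACGT

theorem addSeq_none_iff (s : List Char) :
    ∀ t : Trie, isNode t → (addSeq t s = none ↔ memT t (filt s) = true) := by
  induction s with
  | nil =>
    intro t ht
    cases t with
    | nil => exact absurd ht (by simp [isNode])
    | node e a c g t => cases e <;> simp [addSeq, filt, memT]
  | cons ch rest ih =>
    intro t ht
    cases t with
    | nil => exact absurd ht (by simp [isNode])
    | node e a c g t =>
      by_cases hA : ch = 'A'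
      · simp [addSeq, hA, filt, isACGT, memT, Option.map_eq_none_iff, ← memT_orNew a,
              ih (orNew a) (isNode_orNew a)]
      · by_cases hC : ch = 'C'
        · simp [addSeq, hA, hC, filt, isACGT, memT, Option.map_eq_none_iff, ← memT_orNew c,
                ih (orNew c) (isNode_orNew c)]
        · by_cases hG : ch = 'G'
          · simp [addSeq, hA, hC, hG, filt, isACGT, memT, Option.map_eq_none_iff,
                  ← memT_orNew g, ih (orNew g) (isNode_orNew g)]
          · by_cases hT : ch = 'T'
            · simp [addSeq, hA, hC, hG, hT, filt, isACGT, memT, Option.map_eq_none_iff,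
                    ← memT_orNew t, ih (orNew t) (isNode_orNew t)]
            · simpa [addSeq, hA, hC, hG, hT, filt, isACGT, memT]
                using ih (.node e a c g t) (by simp [isNode])

theorem addSeq_some (s : List Char) :
    ∀ t t' : Trie, isNode t → addSeq t s = some t' →
      isNode t' ∧ ∀ k : List Char, k.all isACGT = true →
        memT t' k = (memT t k || decide (k = filt s)) := by
  induction s with
  | nil =>
    intro t t' ht h
    cases t with
    | nil => exact absurd ht (by simp [isNode])
    | node e a c g t =>
      cases e with
      | true => simp [addSeq] at h
      | false =>
        have ht' : Trie.node true a c g t = t' := by simpa [addSeq] using h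
        subst ht'
        refine ⟨by simp [isNode], ?_⟩
        intro k hk
        cases k with
        | nil => simp [memT, filt]
        | cons ch k' =>
          simp only [List.all_cons, Bool.and_eq_true] at hk
          have hch := hk.1
          simp only [isACGT, Bool.or_eq_true, decide_eq_true_eq] at hch
          rcases hch with ((h1|h1)|h1)|h1 <;> subst h1 <;> simp [memT, filt]
  | cons ch rest ih =>
    intro t t' ht h
    cases t with
    | nil => exact absurd ht (by simp [isNode])
    | node e a c g t =>
      by_cases hA : ch = 'A'
      · rcases hres : addSeq (orNew a) rest with _ | a'
        · simp [addSeq, hA, hres] at h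
        · have ht' : Trie.node e a' c g t = t' := by
            simpa [addSeq, hA, hres] using h
          subst ht'
          obtain ⟨hn, hmem⟩ := ih (orNew a) a' (isNode_orNew a) hres
          refine ⟨by simp [isNode], ?_⟩
          intro k hk
          cases k with
          | nil => simp [memT, filt, isACGT, hA]
          | cons c0 k' =>
            simp only [List.all_cons, Bool.and_eq_true] at hk
            have hch := hk.1
            simp only [isACGT, Bool.or_eq_true, decide_eq_true_eq] at hch
            rcases hch with ((h1|h1)|h1)|h1 <;> subst h1 <;>
              simp [memT, filt, isACGT, hA, hmem k' hk.2, memT_orNew] <;> rfl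
      · by_cases hC : ch = 'C'
        · rcases hres : addSeq (orNew c) rest with _ | c'
          · simp [addSeq, hA, hC, hres] at h
          · have ht' : Trie.node e a c' g t = t' := by
              simpa [addSeq, hA, hC, hres] using h
            subst ht'
            obtain ⟨hn, hmem⟩ := ih (orNew c) c' (isNode_orNew c) hres
            refine ⟨by simp [isNode], ?_⟩
            intro k hk
            cases k with
            | nil => simp [memT, filt, isACGT, hA, hC]
            | cons c0 k' =>
              simp only [List.all_cons, Bool.and_eq_true] at hk
              have hch := hk.1
              simp only [isACGT, Bool.or_eq_true, decide_eq_true_eq] at hch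
              rcases hch with ((h1|h1)|h1)|h1 <;> subst h1 <;>
                simp [memT, filt, isACGT, hA, hC, hmem k' hk.2, memT_orNew] <;> rfl
        · by_cases hG : ch = 'G'
          · rcases hres : addSeq (orNew g) rest with _ | g'
            · simp [addSeq, hA, hC, hG, hres] at h
            · have ht' : Trie.node e a c g' t = t' := by
                simpa [addSeq, hA, hC, hG, hres] using h
              subst ht'
              obtain ⟨hn, hmem⟩ := ih (orNew g) g' (isNode_orNew g) hres
              refine ⟨by simp [isNode], ?_⟩
              intro k hk
              cases k with
              | nil => simp [memT, filt, isACGT, hA, hC, hG]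
              | cons c0 k' =>
                simp only [List.all_cons, Bool.and_eq_true] at hk
                have hch := hk.1
                simp only [isACGT, Bool.or_eq_true, decide_eq_true_eq] at hch
                rcases hch with ((h1|h1)|h1)|h1 <;> subst h1 <;>
                  simp [memT, filt, isACGT, hA, hC, hG, hmem k' hk.2, memT_orNew] <;> rfl
          · by_cases hT : ch = 'T'
            · rcases hres : addSeq (orNew t) rest with _ | t''
              · simp [addSeq, hA, hC, hG, hT, hres] at h
              · have ht' : Trie.node e a c g t'' = t' := by
                  simpa [addSeq, hA, hC, hG, hT, hres] using h
                subst ht'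
                obtain ⟨hn, hmem⟩ := ih (orNew t) t'' (isNode_orNew t) hres
                refine ⟨by simp [isNode], ?_⟩
                intro k hk
                cases k with
                | nil => simp [memT, filt, isACGT, hA, hC, hG, hT]
                | cons c0 k' =>
                  simp only [List.all_cons, Bool.and_eq_true] at hk
                  have hch := hk.1
                  simp only [isACGT, Bool.or_eq_true, decide_eq_true_eq] at hch
                  rcases hch with ((h1|h1)|h1)|h1 <;> subst h1 <;>
                    simp [memT, filt, isACGT, hA, hC, hG, hT, hmem k' hk.2, memT_orNew] <;> rfl
            · have hfilt : filt (ch :: rest) = filt rest := by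
                simp [filt, isACGT, hA, hC, hG, hT]
              have h' : addSeq (.node e a c g t) rest = some t' := by
                simpa [addSeq, hA, hC, hG, hT] using h
              obtain ⟨hn, hmem⟩ := ih (.node e a c g t) t' (by simp [isNode]) h'
              exact ⟨hn, fun k hk => by rw [hfilt]; exact hmem k hk⟩

theorem all_filt (s : List Char) : (filt s).all isACGT = true := by
  simp [filt, List.all_eq_true]

theorem ofList_inj' (k k' : List Char) : String.ofList k = String.ofList k' ↔ k = k' :=
  String.ofList_inj

theorem loop_eq (rest : List String) :
    ∀ (tr : Trie) (seen : PySem.Set String), isNode tr →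
      (∀ k : List Char, k.all isACGT = true → (memT tr k = true ↔ String.ofList k ∈ seen)) →
      check_genes_loop tr rest = check_genes_alt_loop seen rest := by
  induction rest with
  | nil => intro tr seen _ _; rfl
  | cons s rest ih =>
    intro tr seen htr hinv
    have hkey : geneKey s = String.ofList (filt s.toList) := rfl
    have hpure := all_filt s.toList
    cases hadd : addSeq tr s.toList with
    | none =>
      have hmem : memT tr (filt s.toList) = true :=
        (addSeq_none_iff s.toList tr htr).1 hadd
      have hseen : String.ofList (filt s.toList) ∈ seen := (hinv _ hpure).1 hmem
      have hcont : seen.contains (geneKey s) = true := by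
        rw [hkey]; exact (PySem.Set.contains_iff seen _).2 hseen
      simp only [check_genes_loop, hadd]
      simp only [check_genes_alt_loop]
      rw [hcont]
      simp
    | some tr' =>
      have hmem : memT tr (filt s.toList) ≠ true := by
        intro hm
        have := (addSeq_none_iff s.toList tr htr).2 hm
        simp [hadd] at this
      have hseen : String.ofList (filt s.toList) ∉ seen := fun h => hmem ((hinv _ hpure).2 h)
      have hcont : seen.contains (geneKey s) = false := by
        rw [hkey]
        exact Bool.eq_false_iff.2 fun h => hseen ((PySem.Set.contains_iff seen _).1 h)
      obtain ⟨hn', hmem'⟩ := addSeq_some s.toList tr tr' htr hadd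
      have hinv' : ∀ k : List Char, k.all isACGT = true →
          (memT tr' k = true ↔ String.ofList k ∈ seen.add (geneKey s)) := by
        intro k hk
        rw [hmem' k hk, hkey, PySem.Set.mem_add]
        simp only [Bool.or_eq_true, decide_eq_true_eq]
        exact or_congr (hinv k hk) (ofList_inj' _ _).symm
      simp only [check_genes_loop, hadd]
      simp only [check_genes_alt_loop]
      rw [hcont]
      simpa using ih tr' (seen.add (geneKey s)) hn' hinv'

-- ===== VERDICT (by name: the statement is the Claim_ definition above) =====
theorem check_genes_spec : Claim_equal_check_genes := by
  unfold Claim_equal_check_genes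
  intro A _
  unfold Spec_check_genes check_genes check_genes_alt
  rcases A with _ | ⟨s, rest⟩
  · simp
  · simp only [List.length_cons, Nat.succ_ne_zero, if_false, reduceCtorEq]
    exact loop_eq (s :: rest) Trie.fresh (PySem.Set.ofList [])
      (by simp [Trie.fresh, isNode])
      (fun k _ => by simp [memT_fresh, PySem.Set.mem_ofList])
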